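-- pv_equiv track=rewrite | github.com/stoyonaga/EECS-Notes | EECS 3221/Disk Scheduling Algorithms/Circular_Elevator.py | circular_elevator
-- ===== SOURCE A (Python) =====
-- def circular_elevator(head:int, queue:list, control:str) -> list:
--     current = queue
--     current.append(head)
--     current.sort()
--     sol = []
--     # Set-Up
--     start = current.index(head)
--     current.remove(head)
--
--     if control == "UP":
--         for i in range(0, len(current)):
--             sol.append(current[(start + i) % len(current)])
--     elif control == "DOWN":
--         for i in range(0, len(current)):
--             sol.append(current[(start - i - 1) % len(current)])
--     return sol
-- ===== SOURCE B (Python) =====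
-- def circular_elevator(head: int, queue: list, control: str) -> list:
--     # Same in-place mutation as A: queue ends up sorted (A's append/remove of head cancels out).
--     queue.sort()
--     less = [x for x in queue if x < head]
--     geq = [x for x in queue if x >= head]
--     if control == "UP":
--         return geq + less
--     if control == "DOWN":
--         return less[::-1] + geq[::-1]
--     return []
-- ===== Notes on version B (the rewrite author's own statement) =====
-- stated objective: simpler
-- what changed: Replaces A's insert-head/sort/index/remove plus modular-index rotation loops by sorting the queue once and partitioning it into elements below and at-or-above head, returning plain concatenations (reversed for DOWN).
import Mathlib
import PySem

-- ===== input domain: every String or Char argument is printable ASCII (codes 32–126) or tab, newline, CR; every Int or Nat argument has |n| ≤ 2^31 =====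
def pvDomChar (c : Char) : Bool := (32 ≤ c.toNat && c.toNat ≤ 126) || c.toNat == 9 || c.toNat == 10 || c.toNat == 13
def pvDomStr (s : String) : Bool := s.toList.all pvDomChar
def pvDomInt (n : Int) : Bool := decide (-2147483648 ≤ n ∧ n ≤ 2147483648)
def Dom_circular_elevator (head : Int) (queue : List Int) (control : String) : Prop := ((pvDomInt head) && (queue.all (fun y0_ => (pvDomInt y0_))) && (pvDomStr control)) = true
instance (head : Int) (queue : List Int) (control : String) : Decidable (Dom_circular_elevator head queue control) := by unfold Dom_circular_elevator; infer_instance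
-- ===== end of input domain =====

-- B replaces A's insert/sort/index/remove plus modular rotation loops by a sort and a two-way
-- partition with plain concatenations (objective: simpler). Equivalence is about the RETURN value;
-- both Pythons mutate the argument list identically (it ends up sorted).

-- ===== PORT A =====
-- A appends head, sorts, finds head's first index, removes head, then walks modular indices.
-- The index (start ± i …) % len is always in range when the loop body runs (the range is empty
-- when the list is empty), so pyGetD's default 0 is never returned.
def circular_elevator (head : Int) (queue : List Int) (control : String) : List Int :=
  let current := PySem.List.sorted (queue ++ [head]) (fun x => x) false
  let start : Int := ((PySem.List.index? current head).getD 0 : Nat)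
  let current := (PySem.List.remove? current head).getD []
  if control == "UP" then
    (PySem.List.pyRange 0 current.length 1).foldl
      (fun sol i => sol ++ [PySem.List.pyGetD current (PySem.Int.mod (start + i) current.length) 0]) []
  else if control == "DOWN" then
    (PySem.List.pyRange 0 current.length 1).foldl
      (fun sol i => sol ++ [PySem.List.pyGetD current (PySem.Int.mod (start - i - 1) current.length) 0]) []
  else []

-- ===== PORT B =====
def circular_elevator_alt (head : Int) (queue : List Int) (control : String) : List Int :=
  let q := PySem.List.sorted queue (fun x => x) false
  let less := q.filter (fun x => decide (x < head))
  let geq := q.filter (fun x => decide (head ≤ x))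
  if control == "UP" then geq ++ less
  else if control == "DOWN" then less.reverse ++ geq.reverse
  else []

-- ===== PRECONDITION & SPEC =====
def Spec_circular_elevator (head : Int) (queue : List Int) (control : String) (out : List Int) : Prop := out = circular_elevator_alt head queue control
instance (head : Int) (queue : List Int) (control : String) (out : List Int) : Decidable (Spec_circular_elevator head queue control out) := by unfold Spec_circular_elevator; infer_instance

-- ===== CLAIM (what is proved, stated in full; the proofs are below) =====
def Claim_equal_circular_elevator : Prop := ∀ (head : Int) (queue : List Int) (control : String), Dom_circular_elevator head queue control → Spec_circular_elevator head queue control (circular_elevator head queue control)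

-- ===== LEMMAS AND PROOFS =====

-- sorted(queue + [head]) is exactly (elements < head, sorted) ++ head :: (elements ≥ head, sorted)
theorem sorted_append_head (head : Int) (queue : List Int) :
    PySem.List.sorted (queue ++ [head]) (fun x => x) false =
      (PySem.List.sorted queue (fun x => x) false).filter (fun x => decide (x < head)) ++
        head :: (PySem.List.sorted queue (fun x => x) false).filter (fun x => decide (head ≤ x)) := by
  set q := PySem.List.sorted queue (fun x => x) false with hq
  have hfun : (fun x : Int => decide (head ≤ x)) = (fun x => !decide (x < head)) := by
    funext x; simp [← decide_not, not_lt]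
  apply PySem.List.sorted_id_eq_of_perm_of_pairwise
  · refine List.Perm.trans List.perm_middle ?_
    refine List.Perm.trans (List.Perm.cons head ?_) List.perm_middle.symm
    have h1 : q.filter (fun x => decide (x < head)) ++ q.filter (fun x => decide (head ≤ x))
        = q.filter (fun x => decide (x < head)) ++ q.filter (fun x => !decide (x < head)) := by
      rw [hfun]
    rw [h1]
    refine List.Perm.trans (List.filter_append_perm _ q) ?_
    simpa using (PySem.List.sorted_perm queue (fun x => x) false)
  · have hp : q.Pairwise (fun a b => a ≤ b) := by
      simpa using PySem.List.sorted_pairwise queue (fun x => x)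
    refine List.pairwise_append.mpr ⟨hp.filter _, ?_, ?_⟩
    · refine List.pairwise_cons.mpr ⟨?_, hp.filter _⟩
      intro b hb
      have := List.of_mem_filter hb
      simpa using this
    · intro a ha b hb
      have ha' : a < head := by simpa using List.of_mem_filter ha
      rcases List.mem_cons.mp hb with rfl | hb'
      · exact le_of_lt ha'
      · have : head ≤ b := by simpa using List.of_mem_filter hb'
        omega

-- A's UP loop, as a map over range, is the rotation of the list by s
theorem rot_up (l : List Int) (s : Nat) (hs : s ≤ l.length) :
    (PySem.List.pyRange 0 l.length 1).map
        (fun i => PySem.List.pyGetD l (PySem.Int.mod ((s : Int) + i) l.length) 0) =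
      l.drop s ++ l.take s := by
  rw [← List.rotate_eq_drop_append_take hs, PySem.List.pyRange_one]
  simp only [sub_zero, Int.toNat_natCast, List.map_map]
  apply List.ext_getElem
  · simp
  · intro i h1 h2
    simp only [List.getElem_map, List.getElem_range, Function.comp_apply, List.getElem_rotate]
    have hn : (0:Int) < l.length := by
      have : i < l.length := by simpa using h2
      omega
    rw [PySem.Int.mod_eq_emod_of_pos hn]
    have heq : ((s:Int) + (0 + (i:Int))) % (l.length:Int) = (((i + s) % l.length : Nat) : Int) := by
      push_cast; ring_nf
    rw [heq, PySem.List.pyGetD_natCast, List.getD_eq_getElem]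

-- A's DOWN loop is the reverse of that rotation
theorem rot_down (l : List Int) (s : Nat) (hs : s ≤ l.length) :
    (PySem.List.pyRange 0 l.length 1).map
        (fun i => PySem.List.pyGetD l (PySem.Int.mod ((s : Int) - i - 1) l.length) 0) =
      (l.drop s ++ l.take s).reverse := by
  rw [← List.rotate_eq_drop_append_take hs]
  apply List.ext_getElem
  · simp [PySem.List.length_pyRange_one]
  · intro i h1 h2
    have hi : i < l.length := by
      simpa [PySem.List.length_pyRange_one] using h1
    have hn : (0:Int) < l.length := by omega
    rw [List.getElem_map, PySem.List.getElem_pyRange_one]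
    have hrev : (l.rotate s).reverse[i]'h2 = (l.rotate s)[l.length - 1 - i]'(by simp [List.length_rotate]; omega) := by
      rw [List.getElem_reverse]; congr 1; rw [List.length_rotate]
    rw [hrev, List.getElem_rotate]
    rw [PySem.Int.mod_eq_emod_of_pos hn]
    have heq : ((s:Int) - (0 + (i:Int)) - 1) % (l.length:Int)
        = (((l.length - 1 - i + s) % l.length : Nat) : Int) := by
      have h2' : ((l.length - 1 - i + s : Nat) : Int) = (l.length:Int) - 1 - i + s := by push_cast; omega
      rw [Int.natCast_mod, h2']
      conv_lhs => rw [show ((s:Int) - (0 + (i:Int)) - 1) = ((l.length:Int) - 1 - i + s) + (l.length:Int) * (-1) by ring]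
      rw [Int.add_mul_emod_self_left]
    rw [heq, PySem.List.pyGetD_natCast, List.getD_eq_getElem]

theorem circular_elevator_eq_alt (head : Int) (queue : List Int) (control : String) :
    circular_elevator head queue control = circular_elevator_alt head queue control := by
  unfold circular_elevator circular_elevator_alt
  set q := PySem.List.sorted queue (fun x => x) false with hq
  set less := q.filter (fun x => decide (x < head)) with hless
  set geq := q.filter (fun x => decide (head ≤ x)) with hgeq
  have hs : PySem.List.sorted (queue ++ [head]) (fun x => x) false = less ++ head :: geq :=
    sorted_append_head head queue
  have hnotmem : head ∉ less := by
    intro h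
    have := List.of_mem_filter h
    simp at this
  have hidx : PySem.List.index? (less ++ head :: geq) head = some less.length :=
    (PySem.List.index?_eq_some_iff _ head less.length).mpr ⟨less, geq, rfl, rfl, hnotmem⟩
  have hrem : PySem.List.remove? (less ++ head :: geq) head = some (less ++ geq) := by
    have hm : head ∈ less ++ head :: geq := by simp
    rw [PySem.List.remove?_eq_some_erase _ head hm, List.erase_append_right _ hnotmem,
      List.erase_cons_head]
  simp only [hs, hidx, hrem, Option.getD_some]
  have hlen : less.length ≤ (less ++ geq).length := by simp
  by_cases h1 : control == "UP"
  · simp only [h1, if_true]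
    rw [PySem.List.foldl_append_singleton_eq_map, List.nil_append,
      rot_up (less ++ geq) less.length hlen, List.drop_left, List.take_left]
  · by_cases h2 : control == "DOWN"
    · simp only [h1, h2, Bool.false_eq_true, if_false, if_true]
      rw [PySem.List.foldl_append_singleton_eq_map, List.nil_append,
        rot_down (less ++ geq) less.length hlen, List.drop_left, List.take_left,
        List.reverse_append]
    · simp [h1, h2]

-- ===== VERDICT (by name: the statement is the Claim_ definition above) =====
theorem circular_elevator_spec : Claim_equal_circular_elevator := by
  intro head queue control _
  exact circular_elevator_eq_alt head queue control
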